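-- pv_equiv track=rewrite | github.com/MikeStone20/Movie-Link | Movie-Link/Flask_Project/model.py | constructUserList
-- ===== SOURCE A (Python) =====
-- def constructUserList(current_users, user_info, user_id):
--     usernames = []
--     useremails = []
--     profile_pics = []
--     ids = []
--     matching_users = []
--     matching_emails = []
--     matching_pics = []
--
--     if len(user_info) == 0:
--         return (matching_users, matching_emails, matching_pics)
--
--     if current_users is None:  # needs to return a diff template
--         return (matching_users, matching_emails, matching_pics)
--
--     for row in current_users:
--         ids.append(row[0])
--         usernames.append(row[1])
--         useremails.append(row[2])
--         profile_pics.append(row[3])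
--
--     for i in range(0, len(usernames)):
--         if user_info in usernames[i] and user_id != ids[i]:
--             matching_users.append(usernames[i])
--             matching_emails.append(useremails[i])
--             matching_pics.append(profile_pics[i])
--
--     return (matching_users, matching_emails, matching_pics)
-- ===== SOURCE B (Python) =====
-- def constructUserList(current_users, user_info, user_id):
--     matching_users = []
--     matching_emails = []
--     matching_pics = []
--     if user_info and current_users is not None:
--         for row in current_users:
--             if user_info in row[1] and user_id != row[0]:
--                 matching_users.append(row[1])
--                 matching_emails.append(row[2])
--                 matching_pics.append(row[3])
--     return (matching_users, matching_emails, matching_pics)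
-- ===== Notes on version B (the rewrite author's own statement) =====
-- stated objective: simpler
-- what changed: Replaced A's two-phase scheme (unpacking the rows into four parallel column lists and then filtering by index over range(len)) with one direct pass over the rows that appends the three wanted fields when the condition holds; no intermediate lists, no indexing.
import Mathlib
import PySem

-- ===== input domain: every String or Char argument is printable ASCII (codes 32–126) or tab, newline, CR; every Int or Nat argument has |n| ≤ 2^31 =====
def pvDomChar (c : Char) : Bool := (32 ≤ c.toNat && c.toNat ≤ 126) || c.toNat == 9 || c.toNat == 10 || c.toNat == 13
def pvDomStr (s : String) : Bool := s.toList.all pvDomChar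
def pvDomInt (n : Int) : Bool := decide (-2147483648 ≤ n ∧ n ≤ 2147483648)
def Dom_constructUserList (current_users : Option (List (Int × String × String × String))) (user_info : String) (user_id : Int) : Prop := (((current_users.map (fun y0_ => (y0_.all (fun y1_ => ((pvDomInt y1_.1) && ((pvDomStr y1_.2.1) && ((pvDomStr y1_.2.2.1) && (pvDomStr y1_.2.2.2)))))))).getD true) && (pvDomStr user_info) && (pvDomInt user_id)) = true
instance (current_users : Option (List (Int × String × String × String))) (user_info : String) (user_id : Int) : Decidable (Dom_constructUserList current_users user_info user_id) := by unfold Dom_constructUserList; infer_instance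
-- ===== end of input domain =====

-- B replaces A's four parallel column lists and index-based second loop with one direct pass over the rows (objective: simpler).
-- ===== PORT A =====
def constructUserList (current_users : Option (List (Int × String × String × String))) (user_info : String) (user_id : Int) : List String × List String × List String :=
  -- usernames = useremails = profile_pics = ids = [] ; matching_* = []
  if PySem.Str.len user_info == 0 then ([], [], [])
  else
    match current_users with
    | none => ([], [], [])
    | some rows =>
      -- first loop: build the four parallel column lists
      let cols : List Int × List String × List String × List String :=
        rows.foldl (fun st row =>
          (st.1 ++ [row.1], st.2.1 ++ [row.2.1], st.2.2.1 ++ [row.2.2.1], st.2.2.2 ++ [row.2.2.2]))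
          ([], [], [], [])
      -- second loop: for i in range(0, len(usernames)) filter by index
      (PySem.List.pyRange 0 (PySem.List.len cols.2.1) 1).foldl
        (fun (acc : List String × List String × List String) i =>
          if PySem.Str.isIn user_info (PySem.List.pyGetD cols.2.1 i "") && user_id != PySem.List.pyGetD cols.1 i 0 then
            (acc.1 ++ [PySem.List.pyGetD cols.2.1 i ""],
             acc.2.1 ++ [PySem.List.pyGetD cols.2.2.1 i ""],
             acc.2.2 ++ [PySem.List.pyGetD cols.2.2.2 i ""])
          else acc)
        ([], [], [])

-- ===== PORT B =====
def constructUserList_alt (current_users : Option (List (Int × String × String × String))) (user_info : String) (user_id : Int) : List String × List String × List String :=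
  -- single pass directly over the rows, no intermediate column lists
  if user_info.toList ≠ [] then
    match current_users with
    | some rows =>
      rows.foldl (fun (acc : List String × List String × List String) row =>
        if PySem.Str.isIn user_info row.2.1 && user_id != row.1 then
          (acc.1 ++ [row.2.1], acc.2.1 ++ [row.2.2.1], acc.2.2 ++ [row.2.2.2])
        else acc)
        ([], [], [])
    | none => ([], [], [])
  else ([], [], [])

-- ===== PRECONDITION & SPEC =====
def Spec_constructUserList (current_users : Option (List (Int × String × String × String))) (user_info : String) (user_id : Int) (out : List String × List String × List String) : Prop := out = constructUserList_alt current_users user_info user_id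
instance (current_users : Option (List (Int × String × String × String))) (user_info : String) (user_id : Int) (out : List String × List String × List String) : Decidable (Spec_constructUserList current_users user_info user_id out) := by unfold Spec_constructUserList; infer_instance

-- ===== CLAIM (what is proved, stated in full; the proofs are below) =====
def Claim_equal_constructUserList : Prop := ∀ (current_users : Option (List (Int × String × String × String))) (user_info : String) (user_id : Int), Dom_constructUserList current_users user_info user_id → Spec_constructUserList current_users user_info user_id (constructUserList current_users user_info user_id)

-- ===== LEMMAS AND PROOFS =====
-- first loop of A: the four parallel column lists are the four projections of the rows
theorem pvColsEq (rows : List (Int × String × String × String))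
    (a : List Int) (b c d : List String) :
    rows.foldl (fun st row =>
      (st.1 ++ [row.1], st.2.1 ++ [row.2.1], st.2.2.1 ++ [row.2.2.1], st.2.2.2 ++ [row.2.2.2]))
      (a, b, c, d)
    = (a ++ rows.map (·.1), b ++ rows.map (·.2.1), c ++ rows.map (·.2.2.1), d ++ rows.map (·.2.2.2)) := by
  induction rows generalizing a b c d with
  | nil => simp
  | cons r rs ih => simp [List.foldl_cons, ih]

-- second loop of A (index loop over the column lists) equals B's single pass over the rows
theorem pvLoopEq (rows : List (Int × String × String × String)) (ui : String) (uid : Int) :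
    (PySem.List.pyRange 0 (PySem.List.len (rows.map (·.2.1))) 1).foldl
      (fun (acc : List String × List String × List String) i =>
        if PySem.Str.isIn ui (PySem.List.pyGetD (rows.map (·.2.1)) i "") && uid != PySem.List.pyGetD (rows.map (·.1)) i 0 then
          (acc.1 ++ [PySem.List.pyGetD (rows.map (·.2.1)) i ""],
           acc.2.1 ++ [PySem.List.pyGetD (rows.map (·.2.2.1)) i ""],
           acc.2.2 ++ [PySem.List.pyGetD (rows.map (·.2.2.2)) i ""])
        else acc)
      ([], [], [])
    = rows.foldl (fun (acc : List String × List String × List String) row =>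
        if PySem.Str.isIn ui row.2.1 && uid != row.1 then
          (acc.1 ++ [row.2.1], acc.2.1 ++ [row.2.2.1], acc.2.2 ++ [row.2.2.2])
        else acc)
        ([], [], []) := by
  have hlen : PySem.List.len (rows.map (·.2.1)) = PySem.List.len rows := by
    simp [PySem.List.len_eq]
  rw [hlen]
  have := PySem.List.foldl_pyRange_zero_pyGetD rows ((0 : Int), ("" : String), ("" : String), ("" : String))
    (fun (acc : List String × List String × List String) (row : Int × String × String × String) =>
        if PySem.Str.isIn ui row.2.1 && uid != row.1 then
          (acc.1 ++ [row.2.1], acc.2.1 ++ [row.2.2.1], acc.2.2 ++ [row.2.2.2])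
        else acc)
    (([], [], []) : List String × List String × List String)
  rw [← this]
  apply PySem.List.foldl_congr_mem
  intro acc i hi
  have h0 : (0:Int) ≤ i ∧ i < rows.length := by
    have := (PySem.List.mem_pyRange_one).1 (by simpa [PySem.List.len_eq] using hi)
    simpa [PySem.List.len_eq] using this
  have hlt : i.toNat < rows.length := by omega
  have hm : ∀ {β : Type} (f : (Int × String × String × String) → β) (d : β),
      PySem.List.pyGetD (rows.map f) i d = f (rows[i.toNat]'hlt) := by
    intro β f d
    rw [PySem.List.pyGetD_eq_getElem (rows.map f) d h0.1 (by simpa using h0.2)]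
    simp
  have hr : PySem.List.pyGetD rows i ((0:Int),"","","") = rows[i.toNat]'hlt :=
    PySem.List.pyGetD_eq_getElem rows _ h0.1 (by simpa using h0.2)
  simp only [hm, hr]

-- ===== VERDICT (by name: the statement is the Claim_ definition above) =====
theorem constructUserList_spec : Claim_equal_constructUserList := by
  intro current_users user_info user_id _
  unfold Spec_constructUserList constructUserList constructUserList_alt
  by_cases h : user_info.toList = []
  · simp [PySem.Str.len, h]
  · have hne : user_info ≠ "" := fun hc => h (by simp [hc])
    have hlen : (PySem.Str.len user_info == 0) = false := by
      simp [PySem.Str.len, hne]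
    simp only [hlen, Bool.false_eq_true, if_false, ne_eq, h, not_false_iff, if_pos]
    cases current_users with
    | none => rfl
    | some rows =>
      simp only [pvColsEq, List.nil_append]
      exact pvLoopEq rows user_info user_id
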